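-- pv_equiv track=rewrite | github.com/utkuturk/tense-timing | scripts/extract_pcibex_results.py | build_participants
-- ===== SOURCE A (Python) =====
-- from collections import defaultdict
-- from typing import Dict, Iterable, List, Optional, Sequence, Tuple
--
-- def _to_int(value: str) -> Optional[int]:
--     try:
--         return int(value)
--     except (TypeError, ValueError):
--         return None
--
-- def build_participants(rows: Iterable[Dict[str, str]]) -> List[Dict[str, str]]:
--     grouped: Dict[str, Dict[str, object]] = defaultdict(
--         lambda: {
--             "source": set(),
--             "sona": set(),
--             "n_rows": 0,
--             "n_responses": 0,
--             "n_experiment": 0,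
--             "n_filler": 0,
--             "first_reception_time": None,
--             "last_reception_time": None,
--         }
--     )
--
--     for r in rows:
--         pid = r.get("participant_hash", "")
--         g = grouped[pid]
--         g["n_rows"] = int(g["n_rows"]) + 1
--
--         src = (r.get("source") or "").strip()
--         sona = (r.get("SONA_ID_URL") or "").strip()
--         if src:
--             g["source"].add(src)
--         if sona:
--             g["sona"].add(sona)
--
--         reception = _to_int(r.get("results_reception_time", ""))
--         if reception is not None:
--             if g["first_reception_time"] is None or reception < int(g["first_reception_time"]):
--                 g["first_reception_time"] = reception
--             if g["last_reception_time"] is None or reception > int(g["last_reception_time"]):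
--                 g["last_reception_time"] = reception
--
--         is_response = (
--             r.get("PennElementType") == "Scale"
--             and r.get("PennElementName") == "rating"
--             and r.get("Parameter") == "Choice"
--         )
--         if is_response:
--             g["n_responses"] = int(g["n_responses"]) + 1
--             if r.get("label") == "experiment":
--                 g["n_experiment"] = int(g["n_experiment"]) + 1
--             elif r.get("label") == "filler":
--                 g["n_filler"] = int(g["n_filler"]) + 1
--
--     out: List[Dict[str, str]] = []
--     for pid, g in grouped.items():
--         out.append(
--             {
--                 "participant_hash": pid,
--                 "source": ";".join(sorted(g["source"])),
--                 "SONA_ID_URL": ";".join(sorted(g["sona"])),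
--                 "n_rows": str(g["n_rows"]),
--                 "n_responses": str(g["n_responses"]),
--                 "n_experiment": str(g["n_experiment"]),
--                 "n_filler": str(g["n_filler"]),
--                 "first_reception_time": "" if g["first_reception_time"] is None else str(g["first_reception_time"]),
--                 "last_reception_time": "" if g["last_reception_time"] is None else str(g["last_reception_time"]),
--             }
--         )
--     out.sort(key=lambda x: x["participant_hash"])
--     return out
-- ===== SOURCE B (Python) =====
-- from collections import defaultdict
-- from typing import Dict, Iterable, List, Optional
--
--
-- def _to_int(value: str) -> Optional[int]:
--     try:
--         return int(value)
--     except (TypeError, ValueError):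
--         return None
--
--
-- def build_participants(rows: Iterable[Dict[str, str]]) -> List[Dict[str, str]]:
--     # One pass to bucket the rows per participant, then per-group statistics
--     # computed as separate expressions over the bucket.
--     buckets: Dict[str, list] = defaultdict(list)
--     for r in rows:
--         buckets[r.get("participant_hash", "")].append(r)
--
--     out: List[Dict[str, str]] = []
--     for pid in sorted(buckets):
--         rs = buckets[pid]
--         times = [t for t in (_to_int(r.get("results_reception_time", "")) for r in rs) if t is not None]
--         resp = [
--             r for r in rs
--             if r.get("PennElementType") == "Scale"
--             and r.get("PennElementName") == "rating"
--             and r.get("Parameter") == "Choice"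
--         ]
--         sources = {s for s in ((r.get("source") or "").strip() for r in rs) if s}
--         sonas = {s for s in ((r.get("SONA_ID_URL") or "").strip() for r in rs) if s}
--         out.append(
--             {
--                 "participant_hash": pid,
--                 "source": ";".join(sorted(sources)),
--                 "SONA_ID_URL": ";".join(sorted(sonas)),
--                 "n_rows": str(len(rs)),
--                 "n_responses": str(len(resp)),
--                 "n_experiment": str(sum(1 for r in resp if r.get("label") == "experiment")),
--                 "n_filler": str(sum(1 for r in resp if r.get("label") == "filler")),
--                 "first_reception_time": "" if not times else str(min(times)),
--                 "last_reception_time": "" if not times else str(max(times)),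
--             }
--         )
--     return out
-- ===== Notes on version B (the rewrite author's own statement) =====
-- stated objective: simpler
-- what changed: A threads one fold over the rows carrying an 8-field per-participant accumulator dict and sorts the finished records; B first buckets the rows per participant_hash in one pass, then computes each statistic as a separate expression over the bucket (set/filter comprehensions, len, sum, min/max) and emits records in sorted-key order.
import Mathlib
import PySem

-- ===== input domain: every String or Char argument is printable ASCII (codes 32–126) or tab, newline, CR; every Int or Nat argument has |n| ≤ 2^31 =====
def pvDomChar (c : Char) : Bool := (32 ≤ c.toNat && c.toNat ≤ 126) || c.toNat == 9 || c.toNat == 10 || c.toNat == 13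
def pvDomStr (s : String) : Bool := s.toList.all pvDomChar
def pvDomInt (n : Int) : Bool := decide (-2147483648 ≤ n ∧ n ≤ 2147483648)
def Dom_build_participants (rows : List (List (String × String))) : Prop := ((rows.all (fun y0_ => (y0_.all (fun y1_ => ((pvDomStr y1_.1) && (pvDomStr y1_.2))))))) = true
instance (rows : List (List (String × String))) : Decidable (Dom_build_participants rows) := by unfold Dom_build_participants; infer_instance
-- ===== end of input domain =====

-- B buckets the rows per participant first and computes each statistic as a separate
-- expression over the bucket (sets/filters/min/max), instead of A's single fold that
-- threads an 8-field accumulator; same output, objective: simpler decomposition.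

-- shared row-lookup helpers (both Pythons call r.get(...) identically on each row;
-- rget is the association-list first-match lookup of the type convention)
def rget (r : List (String × String)) (k : String) : Option String :=
  (r.find? (fun p => p.1 == k)).map (·.2)

def pidOf (r : List (String × String)) : String := (rget r "participant_hash").getD ""

def srcOf (r : List (String × String)) : String := PySem.Str.strip ((rget r "source").getD "")

def sonaOf (r : List (String × String)) : String := PySem.Str.strip ((rget r "SONA_ID_URL").getD "")

-- _to_int(r.get("results_reception_time", "")) ; int(s) with try/except is ofStr?
def timeOf (r : List (String × String)) : Option Int :=
  PySem.Int.ofStr? ((rget r "results_reception_time").getD "")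

def isResp (r : List (String × String)) : Bool :=
  (rget r "PennElementType" == some "Scale") &&
  (rget r "PennElementName" == some "rating") &&
  (rget r "Parameter" == some "Choice")

-- ===== PORT A =====
-- the per-participant accumulator dict of A
structure PG where
  src : PySem.Set String
  sona : PySem.Set String
  nrows : Int
  nresp : Int
  nexp : Int
  nfill : Int
  first : Option Int
  last : Option Int
deriving DecidableEq, Repr

def pg0 : PG := ⟨[], [], 0, 0, 0, 0, none, none⟩

-- the body of A's loop; each Python statement mutates one distinct field of g
def stepA (g : PG) (r : List (String × String)) : PG :=
  { src := if srcOf r != "" then PySem.Set.add g.src (srcOf r) else g.src,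
    sona := if sonaOf r != "" then PySem.Set.add g.sona (sonaOf r) else g.sona,
    nrows := g.nrows + 1,
    nresp := if isResp r then g.nresp + 1 else g.nresp,
    nexp := if isResp r && (rget r "label" == some "experiment") then g.nexp + 1 else g.nexp,
    -- the elif: label == "filler" is only tested when label == "experiment" failed
    nfill := if isResp r && !(rget r "label" == some "experiment") && (rget r "label" == some "filler")
             then g.nfill + 1 else g.nfill,
    first := match timeOf r with
      | none => g.first
      | some t => match g.first with
        | none => some t
        | some c => if t < c then some t else some c,
    last := match timeOf r with
      | none => g.last
      | some t => match g.last with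
        | none => some t
        | some c => if t > c then some t else some c }

def renderA (pid : String) (g : PG) : List (String × String) :=
  [("participant_hash", pid),
   ("source", PySem.Str.join ";" (PySem.List.sorted g.src (fun s => s))),
   ("SONA_ID_URL", PySem.Str.join ";" (PySem.List.sorted g.sona (fun s => s))),
   ("n_rows", PySem.Int.toStr g.nrows),
   ("n_responses", PySem.Int.toStr g.nresp),
   ("n_experiment", PySem.Int.toStr g.nexp),
   ("n_filler", PySem.Int.toStr g.nfill),
   ("first_reception_time", match g.first with | none => "" | some t => PySem.Int.toStr t),
   ("last_reception_time", match g.last with | none => "" | some t => PySem.Int.toStr t)]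

def build_participants (rows : List (List (String × String))) : List (List (String × String)) :=
  -- grouped[pid] on the defaultdict, then in-place mutation = insert of the updated record
  let grouped := rows.foldl
    (fun d r => d.insert (pidOf r) (stepA (d.getD (pidOf r) pg0) r)) PySem.Dict.empty
  let out := grouped.items.foldl (fun acc p => acc ++ [renderA p.1 p.2]) []
  -- out.sort(key=lambda x: x["participant_hash"]); the key is always present (first pair)
  PySem.List.sorted out (fun x => (rget x "participant_hash").getD "")

-- ===== PORT B =====
def renderB (pid : String) (rs : List (List (String × String))) : List (String × String) :=
  let times := rs.filterMap timeOf
  let resp := rs.filter isResp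
  let sources := PySem.Set.ofList ((rs.map srcOf).filter (fun s => s != ""))
  let sonas := PySem.Set.ofList ((rs.map sonaOf).filter (fun s => s != ""))
  [("participant_hash", pid),
   ("source", PySem.Str.join ";" (PySem.List.sorted sources (fun s => s))),
   ("SONA_ID_URL", PySem.Str.join ";" (PySem.List.sorted sonas (fun s => s))),
   ("n_rows", PySem.Int.toStr (rs.length : Int)),
   ("n_responses", PySem.Int.toStr (resp.length : Int)),
   ("n_experiment", PySem.Int.toStr ((resp.countP (fun r => rget r "label" == some "experiment") : Nat) : Int)),
   ("n_filler", PySem.Int.toStr ((resp.countP (fun r => rget r "label" == some "filler") : Nat) : Int)),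
   ("first_reception_time", match PySem.List.min? times (fun t => t) with | none => "" | some t => PySem.Int.toStr t),
   ("last_reception_time", match PySem.List.max? times (fun t => t) with | none => "" | some t => PySem.Int.toStr t)]

def build_participants_alt (rows : List (List (String × String))) : List (List (String × String)) :=
  -- buckets[r.get("participant_hash","")].append(r)
  let buckets := rows.foldl
    (fun d r => d.modify (pidOf r) [] (fun g => g ++ [r])) PySem.Dict.empty
  -- for pid in sorted(buckets): out.append({...})
  (PySem.List.sorted buckets.keys (fun s => s)).foldl
    (fun acc pid => acc ++ [renderB pid (buckets.getD pid [])]) []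

-- ===== PRECONDITION & SPEC =====
def Spec_build_participants (rows : List (List (String × String))) (out : List (List (String × String))) : Prop := out = build_participants_alt rows
instance (rows : List (List (String × String))) (out : List (List (String × String))) : Decidable (Spec_build_participants rows out) := by unfold Spec_build_participants; infer_instance

-- ===== CLAIM (what is proved, stated in full; the proofs are below) =====
def Claim_equal_build_participants : Prop := ∀ (rows : List (List (String × String))), Dom_build_participants rows → Spec_build_participants rows (build_participants rows)

-- ===== LEMMAS AND PROOFS =====

-- B's per-group statistics, as one record (proof-only helper)
def groupStats (rs : List (List (String × String))) : PG :=
  ⟨PySem.Set.ofList ((rs.map srcOf).filter (fun s => s != "")),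
   PySem.Set.ofList ((rs.map sonaOf).filter (fun s => s != "")),
   (rs.length : Int),
   ((rs.filter isResp).length : Int),
   (((rs.filter isResp).countP (fun r => rget r "label" == some "experiment") : Nat) : Int),
   (((rs.filter isResp).countP (fun r => rget r "label" == some "filler") : Nat) : Int),
   PySem.List.min? (rs.filterMap timeOf) (fun t => t),
   PySem.List.max? (rs.filterMap timeOf) (fun t => t)⟩

theorem minAux (ts : List Int) (t : Int) :
    PySem.List.min? (ts ++ [t]) (fun x => x) =
      some (match PySem.List.min? ts (fun x => x) with
            | none => t | some c => if t < c then t else c) := by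
  cases ts with
  | nil => simp [PySem.List.min?]
  | cons x tl =>
    rw [List.cons_append, PySem.List.min?_id_cons, PySem.List.min?_id_cons, List.foldl_append]
    simp only [List.foldl_cons, List.foldl_nil, Option.some.injEq]
    rw [Int.min_def]; split_ifs <;> omega

theorem maxAux (ts : List Int) (t : Int) :
    PySem.List.max? (ts ++ [t]) (fun x => x) =
      some (match PySem.List.max? ts (fun x => x) with
            | none => t | some c => if t > c then t else c) := by
  cases ts with
  | nil => simp [PySem.List.max?]
  | cons x tl =>
    rw [List.cons_append, PySem.List.max?_id_cons, PySem.List.max?_id_cons, List.foldl_append]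
    simp only [List.foldl_cons, List.foldl_nil, Option.some.injEq]
    rw [Int.max_def]; split_ifs <;> omega

theorem fillerAux (r : List (String × String)) :
    (isResp r && !(rget r "label" == some "experiment") && (rget r "label" == some "filler"))
    = (isResp r && (rget r "label" == some "filler")) := by
  by_cases h : rget r "label" = some "filler"
  · simp [h]
  · have hc : (rget r "label" == some "filler") = false := by simpa using h
    simp [hc]

theorem foldl_stepA_eq_groupStats (rs : List (List (String × String))) :
    rs.foldl stepA pg0 = groupStats rs := by
  induction rs using List.reverseRecOn with
  | nil => rfl
  | append_singleton rs r IH =>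
    rw [List.foldl_append, List.foldl_cons, List.foldl_nil, IH]
    unfold stepA groupStats
    rw [fillerAux]
    simp only [List.map_append, List.filter_append, List.length_append, List.countP_append,
      List.filterMap_append, List.map_cons, List.map_nil, List.filter_cons, List.filter_nil,
      List.filterMap_cons, List.filterMap_nil, PG.mk.injEq]
    refine ⟨?_, ?_, ?_, ?_, ?_, ?_, ?_, ?_⟩
    · by_cases hp : srcOf r = ""
      · simp [hp]
      · simp [hp, PySem.Set.ofList_eq_foldl, List.foldl_append]
    · by_cases hp : sonaOf r = ""
      · simp [hp]
      · simp [hp, PySem.Set.ofList_eq_foldl, List.foldl_append]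
    · simp
    · by_cases hp : isResp r <;> simp [hp]
    · by_cases hp : isResp r
      · by_cases hq : (rget r "label" == some "experiment") = true <;>
          simp [hp, hq]
      · simp [hp]
    · by_cases hp : isResp r
      · by_cases hq : (rget r "label" == some "filler") = true <;>
          simp [hp, hq]
      · simp [hp]
    · cases ht : timeOf r with
      | none => simp
      | some t =>
        rw [minAux]
        cases hm : PySem.List.min? (rs.filterMap timeOf) (fun t => t) <;> simp [apply_ite]; (split_ifs <;> omega)
    · cases ht : timeOf r with
      | none => simp
      | some t =>
        rw [maxAux]
        cases hm : PySem.List.max? (rs.filterMap timeOf) (fun t => t) <;> simp [apply_ite]; (split_ifs <;> omega)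

theorem getD_foldA (rows : List (List (String × String))) (d : PySem.Dict String PG) (pid : String) :
    (rows.foldl (fun d r => d.insert (pidOf r) (stepA (d.getD (pidOf r) pg0) r)) d).getD pid pg0
      = (rows.filter (fun r => pidOf r == pid)).foldl stepA (d.getD pid pg0) := by
  induction rows generalizing d with
  | nil => simp
  | cons r rest IH =>
    simp only [List.foldl_cons, List.filter_cons]
    rw [IH]
    by_cases h : pidOf r = pid
    · subst h; simp
    · have hb : (pidOf r == pid) = false := by simpa using h
      simp [hb, PySem.Dict.getD_insert, Ne.symm h]

theorem getD_foldB (rows : List (List (String × String))) (d : PySem.Dict String (List (List (String × String)))) (pid : String) :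
    (rows.foldl (fun d r => d.modify (pidOf r) [] (fun g => g ++ [r])) d).getD pid []
      = d.getD pid [] ++ rows.filter (fun r => pidOf r == pid) := by
  induction rows generalizing d with
  | nil => simp
  | cons r rest IH =>
    simp only [List.foldl_cons, List.filter_cons]
    rw [IH]
    by_cases h : pidOf r = pid
    · subst h; simp
    · have hb : (pidOf r == pid) = false := by simpa using h
      simp [hb, PySem.Dict.getD_modify, Ne.symm h]

theorem renderAB (pid : String) (rs : List (List (String × String))) :
    renderA pid (groupStats rs) = renderB pid rs := by
  rfl

theorem key_renderB (pid : String) (rs : List (List (String × String))) :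
    (rget (renderB pid rs) "participant_hash").getD "" = pid := by
  rfl

-- ===== VERDICT (by name: the statement is the Claim_ definition above) =====
theorem build_participants_spec : Claim_equal_build_participants := by
  intro rows _
  unfold Spec_build_participants build_participants build_participants_alt
  have hndE : (PySem.Dict.empty : PySem.Dict String PG).keys.Nodup := by
    simp [PySem.Dict.keys_empty]
  have hndE' : (PySem.Dict.empty : PySem.Dict String (List (List (String × String)))).keys.Nodup := by
    simp [PySem.Dict.keys_empty]
  have hndA := PySem.Dict.nodup_keys_foldl_insert_key rows pidOf
    (fun d r => stepA (d.getD (pidOf r) pg0) r) PySem.Dict.empty hndE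
  have hKA := PySem.Dict.keys_foldl_insert_key rows pidOf
    (fun d r => stepA (d.getD (pidOf r) pg0) r) PySem.Dict.empty
  have hKB := PySem.Dict.keys_foldl_modify_key rows pidOf ([] : List (List (String × String)))
    (fun _ r g => g ++ [r]) PySem.Dict.empty
  rw [PySem.Dict.keys_empty] at hKA hKB
  set K : List String := PySem.Set.update [] (rows.map pidOf) with hK
  have hndK : K.Nodup := by rw [← hKA]; exact hndA
  -- A's output list, pre-sort
  dsimp only
  rw [PySem.List.foldl_append_singleton_eq_map, PySem.List.foldl_append_singleton_eq_map,
    List.nil_append, List.nil_append]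
  rw [PySem.Dict.items_eq_map_keys _ hndA pg0, hKA, List.map_map, hKB]
  simp only [Function.comp_def, getD_foldA, getD_foldB, PySem.Dict.getD_empty,
    foldl_stepA_eq_groupStats, renderAB, List.nil_append]
  -- both sides are now about h := fun k => renderB k (filtered rows); compare via the sort
  apply PySem.List.sorted_eq_of_perm_of_pairwise_lt
  · exact ((PySem.List.sorted_perm K (fun s => s) false).map _)
  · rw [List.pairwise_map]
    have hp := PySem.List.sorted_pairwise K (fun s => s)
    have hnd : (PySem.List.sorted K (fun s => s) false).Nodup :=
      ((PySem.List.sorted_perm K (fun s => s) false).nodup_iff).mpr hndK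
    have := hp.and hnd
    refine this.imp ?_
    rintro a b ⟨hle, hne⟩
    simpa [key_renderB] using lt_of_le_of_ne hle hne
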